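-- pv_equiv track=rewrite | github.com/tonghuikang/meta-ai-hackercup-2024 | execution_code/cottontail_climb_part_2/011.py | generate_non_increasing_sequences_recursive
-- ===== SOURCE A (Python) =====
-- def generate_non_increasing_sequences_recursive(length, max_digit):
--     if length == 0:
--         return [()]
--     sequences = []
--     def backtrack(seq, last):
--         if len(seq) == length:
--             sequences.append(tuple(seq))
--             return
--         for digit in range(last, 0, -1):
--             backtrack(seq + [digit], digit)
--     backtrack([], max_digit)
--     return sequences
-- ===== SOURCE B (Python) =====
-- def generate_non_increasing_sequences_recursive(length, max_digit):
--     seqs = [()]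
--     for _ in range(length):
--         seqs = [s + (d,) for s in seqs
--                 for d in range(s[-1] if s else max_digit, 0, -1)]
--     return seqs
-- ===== Notes on version B (the rewrite author's own statement) =====
-- stated objective: alternative
-- what changed: Replaces the recursive DFS backtracking (inner closure appending to a shared list) with an iterative level-by-level expansion: one loop that rebuilds the list of partial sequences length times via a comprehension, extending each partial sequence by every digit not exceeding its last element.
-- outside the precondition, e.g. on generate_non_increasing_sequences_recursive(-1, 0): A returns [], B returns [()]
import Mathlib
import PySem

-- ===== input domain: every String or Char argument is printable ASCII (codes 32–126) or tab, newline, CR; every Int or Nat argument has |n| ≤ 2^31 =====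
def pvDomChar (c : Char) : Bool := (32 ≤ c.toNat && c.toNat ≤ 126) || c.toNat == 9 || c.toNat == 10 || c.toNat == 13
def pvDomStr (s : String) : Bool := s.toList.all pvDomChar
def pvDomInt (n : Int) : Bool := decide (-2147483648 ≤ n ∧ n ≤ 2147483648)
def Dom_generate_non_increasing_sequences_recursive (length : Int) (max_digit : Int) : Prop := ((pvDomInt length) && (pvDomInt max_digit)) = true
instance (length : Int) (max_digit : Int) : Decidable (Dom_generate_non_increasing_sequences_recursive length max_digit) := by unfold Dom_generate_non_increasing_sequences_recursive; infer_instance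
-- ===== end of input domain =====

-- B replaces the recursive DFS backtracking with an iterative level-by-level expansion
-- (one loop over the target length); same output value and order.

-- ===== PORT A =====
-- the inner `backtrack` closure: the shared mutable `sequences` list becomes a threaded
-- accumulator (kept in reverse, `append` = cons; reversed once at the end); `fuel`
-- (= length.toNat, one unit per appended digit) only makes the recursion total in Lean —
-- for length ≥ 0 the base case always fires before fuel runs out.
def pvBacktrack (length : Int) (fuel : Nat) (racc : List (List Int)) (seq : List Int) (last : Int) : List (List Int) :=
  if (seq.length : Int) = length then seq :: racc
  else
    match fuel with
    | 0 => racc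
    | fuel + 1 =>
      (PySem.List.pyRange last 0 (-1)).foldl
        (fun r d => pvBacktrack length fuel r (seq ++ [d]) d) racc

def generate_non_increasing_sequences_recursive (length : Int) (max_digit : Int) : List (List Int) :=
  if length = 0 then [[]]
  else (pvBacktrack length length.toNat [] [] max_digit).reverse

-- ===== PORT B =====
-- the loop body: seqs = [s + (d,) for s in seqs for d in range(s[-1] if s else max_digit, 0, -1)]
-- (`s[-1] if s else max_digit` is List.getLastD s max_digit)
def pvExpand (max_digit : Int) (seqs : List (List Int)) : List (List Int) :=
  seqs.flatMap (fun s =>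
    (PySem.List.pyRange (s.getLastD max_digit) 0 (-1)).map (fun d => s ++ [d]))

-- `for _ in range(length)`: length.toNat iterations (tail-recursive, like Python's lazy range)
def pvLoop (max_digit : Int) : Nat → List (List Int) → List (List Int)
  | 0, seqs => seqs
  | n + 1, seqs => pvLoop max_digit n (pvExpand max_digit seqs)

def generate_non_increasing_sequences_recursive_alt (length : Int) (max_digit : Int) : List (List Int) :=
  pvLoop max_digit length.toNat [[]]

-- ===== PRECONDITION & SPEC =====
-- Pre_ excludes negative length, which is outside the natural domain of a sequence length:
-- there A diverges (RecursionError) for max_digit ≥ 1 and only accidentally returns [] for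
-- max_digit ≤ 0, while B's empty loop returns [()].
def Pre_generate_non_increasing_sequences_recursive (length : Int) (max_digit : Int) : Prop := 0 ≤ length
instance (length : Int) (max_digit : Int) : Decidable (Pre_generate_non_increasing_sequences_recursive length max_digit) := by unfold Pre_generate_non_increasing_sequences_recursive; infer_instance
def pvWitness_generate_non_increasing_sequences_recursive : Int × Int := (3, 4)

def Spec_generate_non_increasing_sequences_recursive (length : Int) (max_digit : Int) (out : List (List Int)) : Prop := out = generate_non_increasing_sequences_recursive_alt length max_digit
instance (length : Int) (max_digit : Int) (out : List (List Int)) : Decidable (Spec_generate_non_increasing_sequences_recursive length max_digit out) := by unfold Spec_generate_non_increasing_sequences_recursive; infer_instance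

-- ===== CLAIM (what is proved, stated in full; the proofs are below) =====
def Claim_equal_generate_non_increasing_sequences_recursive : Prop := ∀ (length : Int) (max_digit : Int), Dom_generate_non_increasing_sequences_recursive length max_digit → Pre_generate_non_increasing_sequences_recursive length max_digit → Spec_generate_non_increasing_sequences_recursive length max_digit (generate_non_increasing_sequences_recursive length max_digit)

-- ===== LEMMAS AND PROOFS =====

-- the common mathematical family: non-increasing sequences of length n with entries in [1, last]
def pvW (last : Int) (n : Nat) : List (List Int) :=
  match n with
  | 0 => [[]]
  | n + 1 =>
    (PySem.List.pyRange last 0 (-1)).flatMap (fun d => (pvW d n).map (fun t => d :: t))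

lemma foldl_rev_prepend (q : Int → List (List Int)) :
    ∀ (l : List Int) (racc : List (List Int)),
    l.foldl (fun r d => (q d).reverse ++ r) racc = (l.flatMap q).reverse ++ racc := by
  intro l
  induction l with
  | nil => simp
  | cons d l ih => intro racc; simp [List.foldl_cons, ih, List.reverse_append]

lemma backtrack_eq (length : Int) : ∀ (fuel : Nat) (racc : List (List Int)) (seq : List Int) (last : Int),
    (seq.length : Int) ≤ length → length ≤ seq.length + fuel →
    pvBacktrack length fuel racc seq last
      = ((pvW last (length - seq.length).toNat).map (fun t => seq ++ t)).reverse ++ racc := by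
  intro fuel
  induction fuel with
  | zero =>
    intro racc seq last h1 h2
    have heq : (seq.length : Int) = length := by omega
    rw [pvBacktrack, if_pos heq]
    have h0 : (length - seq.length).toNat = 0 := by omega
    simp [h0, pvW]
  | succ f ih =>
    intro racc seq last h1 h2
    by_cases heq : (seq.length : Int) = length
    · rw [pvBacktrack, if_pos heq]
      have h0 : (length - seq.length).toNat = 0 := by omega
      simp [h0, pvW]
    · rw [pvBacktrack, if_neg heq]
      have hlt : (seq.length : Int) < length := lt_of_le_of_ne h1 heq
      have hrec : ∀ (r : List (List Int)) (d : Int), pvBacktrack length f r (seq ++ [d]) d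
          = ((pvW d (length - seq.length - 1).toNat).map (fun t => seq ++ [d] ++ t)).reverse ++ r := by
        intro r d
        have := ih r (seq ++ [d]) d (by simp; omega) (by simp; omega)
        simpa [Int.sub_sub] using this
      simp only [hrec]
      rw [foldl_rev_prepend]
      have hm : (length - seq.length).toNat = (length - seq.length - 1).toNat + 1 := by omega
      rw [hm]
      show _ = ((pvW last ((length - seq.length - 1).toNat + 1)).map _).reverse ++ racc
      rw [pvW]
      simp [List.map_flatMap, List.map_map, Function.comp_def, List.append_assoc]

lemma pvLoop_iterate (max_digit : Int) :
    ∀ (n : Nat) (seqs : List (List Int)), pvLoop max_digit n seqs = (pvExpand max_digit)^[n] seqs := by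
  intro n
  induction n with
  | zero => intro seqs; simp [pvLoop]
  | succ n ih => intro seqs; rw [pvLoop, ih, Function.iterate_succ_apply]

lemma expand_iterate (max_digit : Int) : ∀ (k : Nat) (xs : List (List Int)),
    (pvExpand max_digit)^[k] xs
      = xs.flatMap (fun s => (pvW (s.getLastD max_digit) k).map (fun t => s ++ t)) := by
  intro k
  induction k with
  | zero =>
    intro xs
    simp [pvW, List.flatMap_singleton']
  | succ k ih =>
    intro xs
    rw [Function.iterate_succ_apply, ih]
    unfold pvExpand
    rw [List.flatMap_assoc]
    congr 1
    funext s
    rw [List.flatMap_map]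
    show _ = (pvW (s.getLastD max_digit) (k + 1)).map (fun t => s ++ t)
    rw [pvW, List.map_flatMap]
    congr 1
    funext d
    simp [List.map_map, Function.comp_def, List.append_assoc]

-- ===== VERDICT (by name: the statement is the Claim_ definition above) =====
theorem generate_non_increasing_sequences_recursive_spec : Claim_equal_generate_non_increasing_sequences_recursive := by
  intro length max_digit _ hpre
  unfold Spec_generate_non_increasing_sequences_recursive
  unfold generate_non_increasing_sequences_recursive generate_non_increasing_sequences_recursive_alt
  have hB : pvLoop max_digit length.toNat [[]] = pvW max_digit length.toNat := by
    rw [pvLoop_iterate, expand_iterate]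
    simp
  rw [hB]
  by_cases h0 : length = 0
  · have : length.toNat = 0 := by omega
    simp [h0, pvW]
  · rw [if_neg h0]
    have hpre' : (0 : Int) ≤ length := hpre
    rw [backtrack_eq length length.toNat [] [] max_digit (by simpa using hpre') (by simp)]
    simp
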